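-- pv_equiv track=rewrite | github.com/Rorro3/IntroALaProgramacion | guia-7-listas-en-python/ej1.py | posicion_minimo
-- ===== SOURCE A (Python) =====
-- def posicion_minimo(lista: list[int]) -> int:
--     if len(lista) == 0:
--         return -1
--     pos_min = 0
--     for indice in range(1, len(lista)):
--         if lista[indice] < lista[pos_min]:
--             pos_min = indice
--     return pos_min
-- ===== SOURCE B (Python) =====
-- def posicion_minimo(lista: list[int]) -> int:
--     if len(lista) == 0:
--         return -1
--     return lista.index(min(lista))
-- ===== Notes on version B (the rewrite author's own statement) =====
-- stated objective: idiomatic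
-- what changed: Replaces A's single index-tracking scan over range(1, len) with the idiomatic two-pass form: compute min(lista) once, then return its first position via lista.index.
import Mathlib
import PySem

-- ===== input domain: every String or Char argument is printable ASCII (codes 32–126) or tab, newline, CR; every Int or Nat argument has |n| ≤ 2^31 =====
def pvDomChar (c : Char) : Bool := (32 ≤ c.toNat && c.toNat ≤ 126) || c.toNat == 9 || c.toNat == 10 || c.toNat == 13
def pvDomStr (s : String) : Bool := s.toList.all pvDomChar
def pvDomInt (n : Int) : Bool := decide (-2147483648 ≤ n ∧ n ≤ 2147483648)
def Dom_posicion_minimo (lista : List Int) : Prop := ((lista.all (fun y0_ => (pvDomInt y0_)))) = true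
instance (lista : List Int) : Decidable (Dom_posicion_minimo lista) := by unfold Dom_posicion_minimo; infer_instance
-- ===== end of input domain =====

-- B replaces A's index-tracking scan with the idiomatic two-pass form min + index (same cost).

-- ===== PORT A =====
-- literal port: empty guard, then a fold over range(1, len(lista)) tracking pos_min
def posicion_minimo (lista : List Int) : Int :=
  if lista.length = 0 then -1
  else
    (PySem.List.pyRange 1 (lista.length : Int) 1).foldl
      (fun pos_min indice =>
        if PySem.List.pyGetD lista indice 0 < PySem.List.pyGetD lista pos_min 0 then indice
        else pos_min) 0

-- ===== PORT B =====
-- literal port of Source B: min(lista) then lista.index(...); the none branches are unreachable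
def posicion_minimo_alt (lista : List Int) : Int :=
  if lista.length = 0 then -1
  else
    match PySem.List.min? lista (fun x => x) with
    | none => -1
    | some m =>
      match PySem.List.index? lista m with
      | none => -1
      | some k => (k : Int)

-- ===== PRECONDITION & SPEC =====
def Spec_posicion_minimo (lista : List Int) (out : Int) : Prop := out = posicion_minimo_alt lista
instance (lista : List Int) (out : Int) : Decidable (Spec_posicion_minimo lista out) := by unfold Spec_posicion_minimo; infer_instance

-- ===== CLAIM (what is proved, stated in full; the proofs are below) =====
def Claim_equal_posicion_minimo : Prop := ∀ (lista : List Int), Dom_posicion_minimo lista → Spec_posicion_minimo lista (posicion_minimo lista)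

-- ===== LEMMAS AND PROOFS =====

-- A's loop body, made explicit so lemmas can talk about it
def pvStep (xs : List Int) (pos_min indice : Int) : Int :=
  if PySem.List.pyGetD xs indice 0 < PySem.List.pyGetD xs pos_min 0 then indice else pos_min

-- indexing xs ++ [y] at an in-range index of xs is indexing xs
lemma getD_app (xs : List Int) (y : Int) (i : Int) (h0 : 0 ≤ i) (h1 : i < (xs.length : Int)) :
    PySem.List.pyGetD (xs ++ [y]) i 0 = PySem.List.pyGetD xs i 0 := by
  rw [PySem.List.pyGetD_eq_getElem _ _ h0 (by simp; omega),
      PySem.List.pyGetD_eq_getElem _ _ h0 h1]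
  exact List.getElem_append_left (by omega)

lemma fold_ext (n : Nat) : ∀ (xs : List Int) (y : Int) (a acc : Int),
    0 ≤ a → 0 ≤ acc → acc < (xs.length : Int) → (n : Int) = (xs.length : Int) - a →
    (PySem.List.pyRange a (xs.length : Int) 1).foldl (pvStep (xs ++ [y])) acc
      = (PySem.List.pyRange a (xs.length : Int) 1).foldl (pvStep xs) acc := by
  induction n with
  | zero =>
    intro xs y a acc _ _ _ hn
    rw [PySem.List.pyRange_one_eq_nil (by omega)]; rfl
  | succ n ih =>
    intro xs y a acc ha hacc0 hacc1 hn
    have halen : a < (xs.length : Int) := by omega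
    rw [PySem.List.pyRange_one_cons halen]
    simp only [List.foldl_cons]
    have hstep : pvStep (xs ++ [y]) acc a = pvStep xs acc a := by
      unfold pvStep
      rw [getD_app xs y a ha halen, getD_app xs y acc hacc0 hacc1]
    rw [hstep]
    have hnew0 : 0 ≤ pvStep xs acc a := by
      unfold pvStep; split <;> omega
    have hnew1 : pvStep xs acc a < (xs.length : Int) := by
      unfold pvStep; split <;> omega
    exact ih xs y (a + 1) _ (by omega) hnew0 hnew1 (by omega)

lemma fold_min (xs : List Int) (h : xs ≠ []) :
    ∃ m k, PySem.List.min? xs (fun x => x) = some m ∧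
      PySem.List.index? xs m = some k ∧
      (PySem.List.pyRange 1 (xs.length : Int) 1).foldl (pvStep xs) 0 = (k : Int) := by
  induction xs using List.reverseRecOn with
  | nil => exact absurd rfl h
  | append_singleton xs y ih =>
    rcases eq_or_ne xs [] with rfl | hne
    · refine ⟨y, 0, ?_, ?_, ?_⟩
      · simp [PySem.List.min?_id_cons]
      · simp [PySem.List.index?_cons_self]
      · simp [PySem.List.pyRange_one_eq_nil]
    · obtain ⟨m, k, hm, hk, hf⟩ := ih hne
      obtain ⟨hklt, hxk, _⟩ := PySem.List.getElem_of_index?_eq_some hk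
      have hlen : ((xs ++ [y]).length : Int) = (xs.length : Int) + 1 := by simp
      have hrange : PySem.List.pyRange 1 ((xs ++ [y]).length : Int) 1
          = PySem.List.pyRange 1 (xs.length : Int) 1 ++ [(xs.length : Int)] := by
        rw [hlen, PySem.List.pyRange_one_succ_right (by
          have : 0 < xs.length := List.length_pos_iff.mpr hne
          omega)]
      have hlenpos : 0 < xs.length := List.length_pos_iff.mpr hne
      have hext := fold_ext (xs.length - 1) xs y 1 0 (by omega) (by omega)
        (by exact_mod_cast hlenpos) (by omega)
      have hinner : (PySem.List.pyRange 1 ((xs ++ [y]).length : Int) 1).foldl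
          (pvStep (xs ++ [y])) 0
          = pvStep (xs ++ [y]) (k : Int) (xs.length : Int) := by
        rw [hrange, List.foldl_append, hext, hf]
        simp
      have hgk : PySem.List.pyGetD (xs ++ [y]) (k : Int) 0 = m := by
        rw [PySem.List.pyGetD_eq_getElem _ _ (by positivity) (by simp; omega)]
        simp only [Int.toNat_natCast]
        rw [List.getElem_append_left hklt]
        exact hxk
      have hgl : PySem.List.pyGetD (xs ++ [y]) (xs.length : Int) 0 = y := by
        rw [PySem.List.pyGetD_eq_getElem _ _ (by positivity) (by simp)]
        simp
      -- min of xs ++ [y]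
      obtain ⟨x, t, rfl⟩ : ∃ x t, xs = x :: t := by
        cases xs with | nil => exact absurd rfl hne | cons x t => exact ⟨x, t, rfl⟩
      have hm' : PySem.List.min? ((x :: t) ++ [y]) (fun z => z) = some (min m y) := by
        have := PySem.List.min?_id_cons x (t ++ [y])
        rw [List.cons_append, this, List.foldl_append]
        have : List.foldl min x t = m := by
          have := PySem.List.min?_id_cons x t
          rw [hm] at this; exact (Option.some.inj this).symm
        simp [this]
      by_cases hy : y < m
      · refine ⟨y, (x :: t).length, by rw [hm']; simp [min_eq_right (le_of_lt hy)], ?_, ?_⟩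
        · refine PySem.List.index?_append_singleton_self _ y (fun hmem => ?_)
          exact absurd (PySem.List.min?_isMin hm _ hmem) (by omega)
        · rw [hinner]
          unfold pvStep
          rw [hgk, hgl, if_pos hy]
      · refine ⟨m, k, by rw [hm']; simp [min_eq_left (not_lt.mp hy)], ?_, ?_⟩
        · rw [PySem.List.index?_append_of_mem _ (PySem.List.min?_mem hm), hk]
        · rw [hinner]
          unfold pvStep
          rw [hgk, hgl, if_neg hy]

-- ===== VERDICT (by name: the statement is the Claim_ definition above) =====
theorem posicion_minimo_spec : Claim_equal_posicion_minimo := by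
  intro lista _
  unfold Spec_posicion_minimo posicion_minimo posicion_minimo_alt
  by_cases h : lista.length = 0
  · simp [h]
  · have hne : lista ≠ [] := by intro hh; simp [hh] at h
    obtain ⟨m, k, hm, hk, hf⟩ := fold_min lista hne
    simp only [h, hm, hk]
    simpa [pvStep] using hf
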